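-- pv_equiv track=rewrite | github.com/Kloppel/helpers | params.py | split_list_by_keywords
-- ===== SOURCE A (Python) =====
-- def split_list_by_keywords(input_list, keywords):
--     sublists = []  # To store the sublists
--     current_sublist = []  # To store the current sublist
--     for item in input_list:
--         if any(keyword in item for keyword in keywords):
--             if current_sublist:
--                 sublists.append(current_sublist)  # Append the current sublist
--             current_sublist = [item]  # Start a new sublist with the current item
--         else:
--             current_sublist.append(item)  # Add the item to the current sublist
--     if current_sublist:
--         sublists.append(current_sublist)  # Append the last sublist
--     return sublists
-- ===== SOURCE B (Python) =====
-- def split_list_by_keywords(input_list, keywords):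
--     # Single pass over reversed(input_list), building the result back-to-front:
--     # 'revtail' holds the current segment's items in reverse; a keyword item
--     # completes the segment. Segments are collected in reverse and flipped once.
--     revtail = []
--     segments = []
--     for item in reversed(input_list):
--         if any(keyword in item for keyword in keywords):
--             revtail.append(item)
--             segments.append(revtail[::-1])
--             revtail = []
--         else:
--             revtail.append(item)
--     if revtail:
--         segments.append(revtail[::-1])
--     segments.reverse()
--     return segments
-- ===== Notes on version B (the rewrite author's own statement) =====
-- stated objective: alternative
-- what changed: B traverses the list in reverse in one pass, growing the current segment leftwards and prepending finished segments to the output, instead of A's forward accumulation with append-and-reset of a current sublist.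
import Mathlib
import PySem

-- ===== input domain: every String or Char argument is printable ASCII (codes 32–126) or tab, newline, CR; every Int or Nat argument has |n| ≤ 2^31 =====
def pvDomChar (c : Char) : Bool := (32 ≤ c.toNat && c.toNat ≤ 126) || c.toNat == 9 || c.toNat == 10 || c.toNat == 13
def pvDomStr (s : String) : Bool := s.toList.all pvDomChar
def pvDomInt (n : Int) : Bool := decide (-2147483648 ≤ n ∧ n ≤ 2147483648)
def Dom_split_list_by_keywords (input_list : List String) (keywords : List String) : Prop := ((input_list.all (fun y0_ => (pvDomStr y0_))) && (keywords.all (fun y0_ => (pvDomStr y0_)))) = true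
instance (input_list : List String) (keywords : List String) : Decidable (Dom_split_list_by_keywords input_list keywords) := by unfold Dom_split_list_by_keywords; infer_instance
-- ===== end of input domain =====

-- B builds the same segmentation in a single reversed pass (back-to-front), instead of A's forward accumulate-and-reset loop; objective: alternative decomposition.


-- ===== PORT A =====
-- any(keyword in item for keyword in keywords)
def pvIsKw (item : String) (keywords : List String) : Bool :=
  keywords.any (fun keyword => PySem.Str.isIn keyword item)

-- A's loop: state (sublists, current_sublist), then the trailing 'if current_sublist' append
def pvLoopA (keywords : List String) : List String → List (List String) → List String → List (List String)
  | [], sublists, current => if current = [] then sublists else sublists ++ [current]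
  | item :: rest, sublists, current =>
      if pvIsKw item keywords then
        pvLoopA keywords rest (if current = [] then sublists else sublists ++ [current]) [item]
      else
        pvLoopA keywords rest sublists (current ++ [item])

def split_list_by_keywords (input_list : List String) (keywords : List String) : List (List String) :=
  pvLoopA keywords input_list [] []

-- ===== PORT B =====
-- B: one pass over reversed(input_list); state (revtail, segments); segments collected
-- in reverse and flipped once at the end (Source B's appends/[::-1]/reverse are literal here)
def split_list_by_keywords_alt (input_list : List String) (keywords : List String) : List (List String) :=
  let st := input_list.reverse.foldl
    (fun (st : List String × List (List String)) item =>
      if pvIsKw item keywords then ([], st.2 ++ [(st.1 ++ [item]).reverse])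
      else (st.1 ++ [item], st.2))
    ([], [])
  (if st.1 = [] then st.2 else st.2 ++ [st.1.reverse]).reverse

-- ===== PRECONDITION & SPEC =====
def Spec_split_list_by_keywords (input_list : List String) (keywords : List String) (out : List (List String)) : Prop := out = split_list_by_keywords_alt input_list keywords
instance (input_list : List String) (keywords : List String) (out : List (List String)) : Decidable (Spec_split_list_by_keywords input_list keywords out) := by unfold Spec_split_list_by_keywords; infer_instance

-- ===== CLAIM (what is proved, stated in full; the proofs are below) =====
def Claim_equal_split_list_by_keywords : Prop := ∀ (input_list : List String) (keywords : List String), Dom_split_list_by_keywords input_list keywords → Spec_split_list_by_keywords input_list keywords (split_list_by_keywords input_list keywords)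

-- ===== LEMMAS AND PROOFS =====

-- A's forward loop equals B's right fold, up to the pending prefix (subs, cur).
theorem pvLoopA_eq_foldr (keywords : List String) (xs : List String) :
    ∀ (subs : List (List String)) (cur : List String),
    pvLoopA keywords xs subs cur =
      subs ++
        (let st := xs.foldr
            (fun item (st : List String × List (List String)) =>
              if pvIsKw item keywords then ([], (item :: st.1) :: st.2) else (item :: st.1, st.2))
            ([], []);
         if cur ++ st.1 = [] then st.2 else (cur ++ st.1) :: st.2) := by
  induction xs with
  | nil =>
      intro subs cur
      simp only [pvLoopA, List.foldr_nil, List.append_nil]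
      by_cases h : cur = [] <;> simp [h]
  | cons item rest ih =>
      intro subs cur
      simp only [pvLoopA, List.foldr_cons]
      by_cases hk : pvIsKw item keywords = true
      · simp only [hk, ih]
        by_cases hc : cur = [] <;> simp [hc]
      · simp only [hk, ih]
        simp

-- Source B's reversed-state fold equals the prepend-style right fold, componentwise reversed.
theorem foldr_rev_state (keywords : List String) (xs : List String) :
    xs.foldr
      (fun item (st : List String × List (List String)) =>
        if pvIsKw item keywords then ([], st.2 ++ [(st.1 ++ [item]).reverse])
        else (st.1 ++ [item], st.2))
      ([], []) =
    ((xs.foldr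
        (fun item (st : List String × List (List String)) =>
          if pvIsKw item keywords then ([], (item :: st.1) :: st.2) else (item :: st.1, st.2))
        ([], [])).1.reverse,
     (xs.foldr
        (fun item (st : List String × List (List String)) =>
          if pvIsKw item keywords then ([], (item :: st.1) :: st.2) else (item :: st.1, st.2))
        ([], [])).2.reverse) := by
  induction xs with
  | nil => rfl
  | cons item rest ih =>
      simp only [List.foldr_cons, ih]
      by_cases hk : pvIsKw item keywords = true <;> simp [hk]

theorem split_eq (input_list keywords : List String) :
    split_list_by_keywords input_list keywords = split_list_by_keywords_alt input_list keywords := by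
  have h := pvLoopA_eq_foldr keywords input_list [] []
  simp only [split_list_by_keywords, split_list_by_keywords_alt, List.foldl_reverse,
    foldr_rev_state]
  simp only [h, List.nil_append]
  set st := input_list.foldr
    (fun item (st : List String × List (List String)) =>
      if pvIsKw item keywords then ([], (item :: st.1) :: st.2) else (item :: st.1, st.2))
    ([], []) with hst
  by_cases hc : st.1 = [] <;> simp [hc]

-- ===== VERDICT (by name: the statement is the Claim_ definition above) =====
theorem split_list_by_keywords_spec : Claim_equal_split_list_by_keywords := by
  intro input_list keywords _
  unfold Spec_split_list_by_keywords
  exact split_eq input_list keywords
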